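-- pv_equiv track=rewrite | github.com/Sibirava/Homework_12_Level_C | Task02.py | find_nearest_element_to_hvg
-- ===== SOURCE A (Python) =====
-- def find_nearest_element_to_hvg(vector, d_discrepancy, hvg):
--     ls = []
--     count = 0
--     for j in range(hvg - d_discrepancy, hvg + d_discrepancy + 1):
--         for element in vector:
--             if element == j:
--                 count += 1
--                 ls.append(element)
--     return (count, ls)
-- ===== SOURCE B (Python) =====
-- def find_nearest_element_to_hvg(vector, d_discrepancy, hvg):
--     counts = {}
--     for element in vector:
--         if hvg - d_discrepancy <= element <= hvg + d_discrepancy: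
--             counts[element] = counts.get(element, 0) + 1
--     ls = []
--     for value in sorted(counts):
--         ls += [value] * counts[value]
--     return (len(ls), ls)
-- ===== Notes on version B (the rewrite author's own statement) =====
-- stated objective: faster
-- what changed: Replaces the O(n*d) scan of the whole vector for every value in the +/-d window by one counting pass over the vector (keeping only in-window values) followed by emitting the sorted distinct values with their multiplicities.
import Mathlib
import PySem

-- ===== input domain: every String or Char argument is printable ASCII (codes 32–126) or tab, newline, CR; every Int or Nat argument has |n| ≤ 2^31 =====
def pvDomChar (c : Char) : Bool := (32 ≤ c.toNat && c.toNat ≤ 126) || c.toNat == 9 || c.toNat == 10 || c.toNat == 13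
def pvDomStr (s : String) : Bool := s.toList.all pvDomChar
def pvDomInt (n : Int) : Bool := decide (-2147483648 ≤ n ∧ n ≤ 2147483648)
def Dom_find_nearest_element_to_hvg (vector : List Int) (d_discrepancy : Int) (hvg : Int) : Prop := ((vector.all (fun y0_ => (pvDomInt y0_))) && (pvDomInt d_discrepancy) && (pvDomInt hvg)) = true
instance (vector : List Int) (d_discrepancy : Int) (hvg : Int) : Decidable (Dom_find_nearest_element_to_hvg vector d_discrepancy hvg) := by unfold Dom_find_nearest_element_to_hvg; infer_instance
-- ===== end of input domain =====

-- B replaces A's rescans of the whole vector for each value in the ±d window by one counting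
-- pass over the vector plus an output pass over the sorted distinct in-window values (objective: faster).

-- ===== PORT A =====
def find_nearest_element_to_hvg (vector : List Int) (d_discrepancy : Int) (hvg : Int) : Int × List Int :=
  -- ls = []; count = 0; for j in range(...): for element in vector: if element == j: count += 1; ls.append(element)
  let st := (PySem.List.pyRange (hvg - d_discrepancy) (hvg + d_discrepancy + 1) 1).foldl
    (fun (st : Int × List Int) j =>
      vector.foldl
        (fun (st : Int × List Int) element =>
          if element == j then (st.1 + 1, st.2 ++ [element]) else st)
        st)
    (0, [])
  (st.1, st.2)

-- ===== PORT B =====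
def find_nearest_element_to_hvg_alt (vector : List Int) (d_discrepancy : Int) (hvg : Int) : Int × List Int :=
  -- counts = {}; for element in vector: if hvg-d <= element <= hvg+d: counts[element] = counts.get(element,0)+1
  let counts : PySem.Dict Int Int := vector.foldl
    (fun dct element =>
      if hvg - d_discrepancy ≤ element ∧ element ≤ hvg + d_discrepancy then
        dct.insert element (dct.getD element 0 + 1)
      else dct)
    PySem.Dict.empty
  -- ls = []; for value in sorted(counts): ls += [value] * counts[value]
  let ls : List Int := (PySem.List.sorted counts.keys (fun x => x) false).foldl
    (fun acc value => acc ++ PySem.List.pyRepeat [value] (counts.getD value 0)) []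
  ((ls.length : Int), ls)

-- ===== PRECONDITION & SPEC =====
def Spec_find_nearest_element_to_hvg (vector : List Int) (d_discrepancy : Int) (hvg : Int) (out : Int × List Int) : Prop := out = find_nearest_element_to_hvg_alt vector d_discrepancy hvg
instance (vector : List Int) (d_discrepancy : Int) (hvg : Int) (out : Int × List Int) : Decidable (Spec_find_nearest_element_to_hvg vector d_discrepancy hvg out) := by unfold Spec_find_nearest_element_to_hvg; infer_instance

-- ===== CLAIM (what is proved, stated in full; the proofs are below) =====
def Claim_equal_find_nearest_element_to_hvg : Prop := ∀ (vector : List Int) (d_discrepancy : Int) (hvg : Int), Dom_find_nearest_element_to_hvg vector d_discrepancy hvg → Spec_find_nearest_element_to_hvg vector d_discrepancy hvg (find_nearest_element_to_hvg vector d_discrepancy hvg)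

-- ===== LEMMAS AND PROOFS =====

-- A's inner loop over the vector: adds count j occurrences and appends them (all equal to j).
theorem pv_innerA (vector : List Int) (j : Int) (st : Int × List Int) :
    vector.foldl (fun (st : Int × List Int) element =>
        if element == j then (st.1 + 1, st.2 ++ [element]) else st) st
      = (st.1 + (vector.count j : Int), st.2 ++ List.replicate (vector.count j) j) := by
  induction vector generalizing st with
  | nil => simp
  | cons e t ih =>
    by_cases h : e = j
    · subst h
      simp only [List.foldl_cons, beq_self_eq_true, if_pos, List.count_cons_self, ih]
      simp only [Prod.mk.injEq]
      refine ⟨by push_cast; ring, by simp [List.replicate_succ, List.append_assoc]⟩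
    · simp only [List.foldl_cons]
      rw [if_neg (by simp [h]), ih]
      simp [h]

-- A's result in closed form: flatMap of replicates over the range, with its length.
theorem pv_A_closed (vector : List Int) (d_discrepancy hvg : Int) :
    find_nearest_element_to_hvg vector d_discrepancy hvg
      = (((((PySem.List.pyRange (hvg - d_discrepancy) (hvg + d_discrepancy + 1) 1).flatMap
            (fun j => List.replicate (vector.count j) j)).length : Int)),
         (PySem.List.pyRange (hvg - d_discrepancy) (hvg + d_discrepancy + 1) 1).flatMap
            (fun j => List.replicate (vector.count j) j)) := by
  have hstep : (fun (st : Int × List Int) j =>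
      vector.foldl (fun (st : Int × List Int) element =>
        if element == j then (st.1 + 1, st.2 ++ [element]) else st) st)
      = (fun (st : Int × List Int) j =>
          (st.1 + (vector.count j : Int), st.2 ++ List.replicate (vector.count j) j)) :=
    funext fun st => funext fun j => pv_innerA vector j st
  unfold find_nearest_element_to_hvg
  rw [hstep]
  simp only [Prod.mk.eta]
  rw [PySem.List.foldl_prod_mk (fun (a : Int) j => a + (vector.count j : Int))
      (fun (b : List Int) j => b ++ List.replicate (vector.count j) j)]
  refine Prod.ext ?_ ?_
  · simp only [PySem.List.foldl_add, List.length_flatMap]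
    simp [Function.comp_def, Nat.cast_list_sum]
  · simp [List.flatMap_def]

-- dropping values of count 0 from a flatMap of replicates
theorem pv_flatMap_filter (R : List Int) (f : Int → List Int) (p : Int → Bool)
    (h : ∀ j ∈ R, p j = false → f j = []) :
    R.flatMap f = (R.filter p).flatMap f := by
  induction R with
  | nil => simp
  | cons a t ih =>
    by_cases hp : p a = true
    · simp [hp, ih (fun j hj => h j (List.mem_cons_of_mem a hj))]
    · have : f a = [] := h a (List.mem_cons_self) (by simpa using hp)
      simp [hp, this, ih (fun j hj => h j (List.mem_cons_of_mem a hj))]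

-- B's result in closed form: sorted distinct in-window values, each replicated by its count.
theorem pv_B_closed (vector : List Int) (d_discrepancy hvg : Int) :
    find_nearest_element_to_hvg_alt vector d_discrepancy hvg
      = ((((PySem.List.sorted (PySem.Set.ofList (vector.filter
              (fun e => decide (hvg - d_discrepancy ≤ e ∧ e ≤ hvg + d_discrepancy)))) (fun x => x) false).flatMap
            (fun v => List.replicate ((vector.filter
              (fun e => decide (hvg - d_discrepancy ≤ e ∧ e ≤ hvg + d_discrepancy))).count v) v)).length : Int),
         (PySem.List.sorted (PySem.Set.ofList (vector.filter
              (fun e => decide (hvg - d_discrepancy ≤ e ∧ e ≤ hvg + d_discrepancy)))) (fun x => x) false).flatMap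
            (fun v => List.replicate ((vector.filter
              (fun e => decide (hvg - d_discrepancy ≤ e ∧ e ≤ hvg + d_discrepancy))).count v) v)) := by
  unfold find_nearest_element_to_hvg_alt
  rw [PySem.List.foldl_ite_eq_foldl_filter, PySem.Dict.foldl_insert_getD_add_one_eq_counter]
  simp only [PySem.Dict.keys_counter, PySem.Dict.getD_counter,
    PySem.List.foldl_append_eq_flatMap, List.nil_append, PySem.List.pyRepeat_singleton,
    Int.toNat_natCast]

-- ===== VERDICT (by name: the statement is the Claim_ definition above) =====
theorem find_nearest_element_to_hvg_spec : Claim_equal_find_nearest_element_to_hvg := by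
  intro vector d_discrepancy hvg _
  unfold Spec_find_nearest_element_to_hvg
  rw [pv_A_closed, pv_B_closed]
  set p : Int → Bool := fun e => decide (hvg - d_discrepancy ≤ e ∧ e ≤ hvg + d_discrepancy) with hp
  set filtered := vector.filter p with hfil
  set R := PySem.List.pyRange (hvg - d_discrepancy) (hvg + d_discrepancy + 1) 1 with hR
  set q : Int → Bool := fun j => decide (0 < vector.count j) with hq
  have hK : PySem.List.sorted (PySem.Set.ofList filtered) (fun x => x) false = R.filter q := by
    apply PySem.List.sorted_eq_of_perm_of_pairwise_lt
    · refine (List.perm_ext_iff_of_nodup (List.Nodup.filter q (PySem.List.nodup_pyRange_one _ _))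
        (PySem.Set.nodup_ofList _)).mpr ?_
      intro v
      rw [List.mem_filter, PySem.Set.mem_ofList, hfil, List.mem_filter,
        PySem.List.mem_pyRange_one]
      simp only [hp, hq, decide_eq_true_iff, List.count_pos_iff]
      constructor
      · rintro ⟨⟨h1, h2⟩, h3⟩; exact ⟨h3, h1, by omega⟩
      · rintro ⟨h3, h1, h2⟩; exact ⟨⟨h1, by omega⟩, h3⟩
    · exact List.Pairwise.filter q (PySem.List.pairwise_lt_pyRange_one _ _)
  rw [hK]
  have hcount : ∀ v ∈ R.filter q, filtered.count v = vector.count v := by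
    intro v hv
    rw [List.mem_filter, hR, PySem.List.mem_pyRange_one] at hv
    rw [hfil, List.count_filter]
    have : p v = true := by rw [hp]; simp only [decide_eq_true_iff]; omega
    simp [this]
  have hdrop : R.flatMap (fun j => List.replicate (vector.count j) j)
      = (R.filter q).flatMap (fun j => List.replicate (vector.count j) j) := by
    apply pv_flatMap_filter
    intro j _ hj
    rw [hq] at hj
    simp only [decide_eq_false_iff_not, Nat.not_lt, Nat.le_zero] at hj
    simp [hj]
  have hmaps : List.flatMap (fun j => List.replicate (List.count j vector) j) (List.filter q R)
      = List.flatMap (fun v => List.replicate (List.count v filtered) v) (List.filter q R) :=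
    List.flatMap_congr (fun v hv => by rw [hcount v hv])
  rw [hdrop, hmaps]
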